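-- pv_equiv track=rewrite | github.com/daveisagit/advent-of-code | src/common/general.py | find_sublists
-- ===== SOURCE A (Python) =====
-- from collections import deque
--
-- def window_over(iterable, width: int, step=1):
--     """Generator of windows over an iterable"""
--     for idx in range(0, len(iterable) - width + 1, step):
--         yield iterable[idx : idx + width]
--
-- def find_sublists(lst, max_occur=None, min_size=1, max_size=None):
--     """Return a list of list that would cover the whole list for any
--     arrangement and re-se of the sublists"""
--
--     def remove_state():
--         wl = lst.copy()
--         for sl in state:
--             # remove all occurrences of sl from wl
--             removing = True
--             while removing:
--                 removing = False
--                 for p, w in enumerate(window_over(wl, len(sl))):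
--                     if w == sl:
--                         wl = wl[:p] + wl[p + len(sl) :]
--                         removing = True
--                         break
--         return wl
--
--     if max_occur is None:
--         max_occur = len(lst)
--     if max_size is None:
--         max_size = len(lst)
--
--     dfs = deque()
--     dfs.append([])
--     while dfs:
--         state = dfs.pop()
--         wl = remove_state()
--         if not wl:
--             if len(state) <= max_occur:
--                 return state
--
--         for s in range(min_size, min(max_size, len(wl))):
--             t = wl[:s]
--             ns = state.copy()
--             ns.append(t)
--             dfs.append(ns)
--
--     return None
-- ===== SOURCE B (Python) =====
-- def find_sublists(lst, max_occur=None, min_size=1, max_size=None):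
--     """Return a list of list that would cover the whole list for any
--     arrangement and re-se of the sublists"""
--     if max_occur is None:
--         max_occur = len(lst)
--     if max_size is None:
--         max_size = len(lst)
--
--     def purge(wl, sl):
--         # One-pass stack matcher: push elements, pop whenever the top of the
--         # stack equals sl.  Equivalent to repeatedly splicing out the leftmost
--         # occurrence of sl until none remains.
--         k = len(sl)
--         stk = []
--         for x in wl:
--             stk.append(x)
--             if k and len(stk) >= k and stk[-1] == sl[-1] and stk[len(stk) - k:] == sl:
--                 del stk[len(stk) - k:]
--         return stk
--
--     def remove_state(state):
--         wl = lst
--         for sl in state: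
--             wl = purge(wl, sl)
--         return wl
--
--     def rec(state):
--         wl = remove_state(state)
--         if not wl:
--             return state if len(state) <= max_occur else None
--         for s in range(min(max_size, len(wl)) - 1, min_size - 1, -1):
--             r = rec(state + [wl[:s]])
--             if r is not None:
--                 return r
--         return None
--
--     return rec([])
-- ===== Notes on version B (the rewrite author's own statement) =====
-- stated objective: alternative
-- what changed: The repeated rescan-and-splice removal loop is replaced by a one-pass stack matcher (push each element, pop when the stack top equals the sublist), and the explicit deque DFS with closure-captured state becomes a direct recursion that returns the first success over an explicit descending range of prefix sizes.
-- outside the precondition, e.g. on find_sublists([], None, 0, None): A returns [], B returns []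
import Mathlib
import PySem

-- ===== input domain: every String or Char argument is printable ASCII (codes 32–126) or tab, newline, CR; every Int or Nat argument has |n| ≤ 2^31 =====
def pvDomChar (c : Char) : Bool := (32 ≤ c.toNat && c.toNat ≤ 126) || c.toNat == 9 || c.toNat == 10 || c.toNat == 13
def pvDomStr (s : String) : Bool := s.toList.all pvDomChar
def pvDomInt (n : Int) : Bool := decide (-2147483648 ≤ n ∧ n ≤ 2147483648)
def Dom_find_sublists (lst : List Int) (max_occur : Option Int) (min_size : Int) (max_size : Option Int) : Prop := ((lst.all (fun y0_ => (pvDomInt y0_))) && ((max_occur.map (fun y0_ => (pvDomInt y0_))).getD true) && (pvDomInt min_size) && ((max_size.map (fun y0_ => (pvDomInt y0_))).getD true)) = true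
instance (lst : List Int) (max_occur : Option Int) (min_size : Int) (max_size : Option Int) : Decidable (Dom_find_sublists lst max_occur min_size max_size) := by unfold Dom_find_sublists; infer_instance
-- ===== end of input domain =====

-- B replaces A's rescan-and-splice removal by a one-pass stack matcher and A's explicit
-- deque DFS by a direct recursion over a descending range of prefix sizes (same results).

-- ===== PORT A =====
-- first index p with wl[p:p+len(sl)] == sl (the enumerate(window_over(...)) scan with break)
def pvFindWinA (wl sl : List Int) : Option Nat :=
  (List.range (wl.length + 1 - sl.length)).find? (fun p => ((wl.drop p).take sl.length) == sl)

-- the 'while removing' loop; fuel bounds the number of splices (enough whenever sl ≠ [])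
def pvRemoveAllA : Nat → List Int → List Int → List Int
  | 0, wl, _ => wl
  | f+1, wl, sl =>
    match pvFindWinA wl sl with
    | none => wl
    | some p => pvRemoveAllA f (wl.take p ++ wl.drop (p + sl.length)) sl

-- remove_state(): fold the removal over the sublists of state, starting from lst
def pvRemoveStateA (lst : List Int) (state : List (List Int)) : List Int :=
  state.foldl (fun wl sl => pvRemoveAllA (wl.length + 1) wl sl) lst

-- the 'while dfs' loop; the stack head is the deque's right end (pop/append side);
-- fuel bounds the number of pops (enough whenever 1 ≤ min_size)
def pvLoopA (lst : List Int) (mo mi ma : Int) : Nat → List (List (List Int)) → Option (List (List Int))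
  | 0, _ => none
  | _+1, [] => none
  | f+1, state :: rest =>
    let wl := pvRemoveStateA lst state
    if wl = [] ∧ (state.length : Int) ≤ mo then some state
    else
      let children := (PySem.List.pyRange mi (min ma (wl.length : Int)) 1).map
        (fun s => state ++ [PySem.List.slice wl none (some s)])
      pvLoopA lst mo mi ma f (children.reverse ++ rest)

def find_sublists (lst : List Int) (max_occur : Option Int) (min_size : Int) (max_size : Option Int) : Option (List (List Int)) :=
  let mo := max_occur.getD (lst.length : Int)
  let ma := max_size.getD (lst.length : Int)
  pvLoopA lst mo min_size ma ((lst.length + 2) ^ (lst.length + 2)) [[]]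

-- ===== PORT B =====
-- purge's loop body: push x on the stack, pop the top |sl| elements when they equal sl;
-- the guards mirror Source B's short-circuit 'k and len(stk) >= k and stk[-1] == sl[-1] and ...'
-- (under them both getLast? values are 'some', so '=' is exactly Python's '==' there)
def pvPurgeStep (sl stk : List Int) (x : Int) : List Int :=
  let st := stk ++ [x]
  if sl.length ≠ 0 ∧ sl.length ≤ st.length ∧ st.getLast? = sl.getLast?
      ∧ st.drop (st.length - sl.length) = sl
  then st.take (st.length - sl.length) else st

-- purge(wl, sl): one pass over wl with the matcher stack
def pvPurgeB (wl sl : List Int) : List Int := wl.foldl (pvPurgeStep sl) []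

-- remove_state(state)
def pvRemoveStateB (lst : List Int) (state : List (List Int)) : List Int :=
  state.foldl (fun wl sl => pvPurgeB wl sl) lst

-- the 'for s in range(hi, lo, -1)' loop returning the first non-None recursive result:
-- cnt iterations, s descending from its start value
def pvDescB {alpha : Type} (f : Int → Option alpha) : Nat → Int → Option alpha
  | 0, _ => none
  | c+1, s =>
    match f s with
    | some r => some r
    | none => pvDescB f c (s - 1)

-- rec(state); fuel bounds the recursion depth (enough whenever 1 ≤ min_size)
def pvRecB (lst : List Int) (mo mi ma : Int) : Nat → List (List Int) → Option (List (List Int))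
  | 0, _ => none
  | fuel+1, state =>
    let wl := pvRemoveStateB lst state
    if wl = [] then (if (state.length : Int) ≤ mo then some state else none)
    else
      let u := min ma (wl.length : Int)
      pvDescB (fun s => pvRecB lst mo mi ma fuel (state ++ [wl.take s.toNat])) (u - mi).toNat (u - 1)

def find_sublists_alt (lst : List Int) (max_occur : Option Int) (min_size : Int) (max_size : Option Int) : Option (List (List Int)) :=
  let mo := max_occur.getD (lst.length : Int)
  let ma := max_size.getD (lst.length : Int)
  pvRecB lst mo min_size ma (lst.length + 1) []

-- ===== PRECONDITION & SPEC =====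
-- Pre_ excludes min_size < 1: there A's search pushes an empty (or negative-length) prefix
-- and remove_state loops forever on it, so A diverges except on degenerate inputs
-- (empty lst, or an empty size range) where both programs agree anyway.
def Pre_find_sublists (lst : List Int) (max_occur : Option Int) (min_size : Int) (max_size : Option Int) : Prop :=
  1 ≤ min_size
instance (lst : List Int) (max_occur : Option Int) (min_size : Int) (max_size : Option Int) : Decidable (Pre_find_sublists lst max_occur min_size max_size) := by unfold Pre_find_sublists; infer_instance

def pvWitness_find_sublists : List Int × Option Int × Int × Option Int := ([1, 2, 1], none, 1, none)

def Spec_find_sublists (lst : List Int) (max_occur : Option Int) (min_size : Int) (max_size : Option Int) (out : Option (List (List Int))) : Prop := out = find_sublists_alt lst max_occur min_size max_size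
instance (lst : List Int) (max_occur : Option Int) (min_size : Int) (max_size : Option Int) (out : Option (List (List Int))) : Decidable (Spec_find_sublists lst max_occur min_size max_size out) := by unfold Spec_find_sublists; infer_instance

-- ===== CLAIM (what is proved, stated in full; the proofs are below) =====
def Claim_equal_find_sublists : Prop := ∀ (lst : List Int) (max_occur : Option Int) (min_size : Int) (max_size : Option Int), Dom_find_sublists lst max_occur min_size max_size → Pre_find_sublists lst max_occur min_size max_size → Spec_find_sublists lst max_occur min_size max_size (find_sublists lst max_occur min_size max_size)

-- ===== LEMMAS AND PROOFS =====

-- "l contains no occurrence of sl"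
def pvSlFree (sl l : List Int) : Prop :=
  ∀ p, p + sl.length ≤ l.length → (l.drop p).take sl.length ≠ sl

-- a successful window search is in range and matches
theorem pvFindWinA_some {wl sl : List Int} {p : Nat} (h : pvFindWinA wl sl = some p) :
    p + sl.length ≤ wl.length ∧ (wl.drop p).take sl.length = sl := by
  unfold pvFindWinA at h
  have hmem := List.mem_of_find?_eq_some h
  have hp := List.find?_some h
  simp only [List.mem_range] at hmem
  constructor
  · omega
  · exact beq_iff_eq.mp hp

-- on an sl-free list the window search fails
theorem pvFindWinA_none {sl l : List Int} (hsl : sl ≠ []) (h : pvSlFree sl l) :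
    pvFindWinA l sl = none := by
  unfold pvFindWinA
  refine List.find?_eq_none.mpr ?_
  intro p hp
  simp only [List.mem_range] at hp
  have hsl1 : 1 ≤ sl.length := List.length_pos_iff.mpr hsl
  simp only [beq_iff_eq]
  exact h p (by omega)

-- removing [] is the identity for any fuel
theorem pvRemoveAllA_nil_sl (f : Nat) (wl : List Int) : pvRemoveAllA f wl [] = wl := by
  induction f generalizing wl with
  | zero => rfl
  | succ f ih =>
    have hfind : pvFindWinA wl [] = some 0 := by
      unfold pvFindWinA
      have : wl.length + 1 - ([] : List Int).length = wl.length + 1 := by simp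
      rw [this, List.range_succ_eq_map, List.find?_cons_of_pos]
      simp
    simp only [pvRemoveAllA, hfind]
    simpa using ih wl

-- removal never lengthens the list
theorem pvRemoveAllA_le (f : Nat) (wl sl : List Int) : (pvRemoveAllA f wl sl).length ≤ wl.length := by
  induction f generalizing wl with
  | zero => exact le_refl _
  | succ f ih =>
    simp only [pvRemoveAllA]
    cases h : pvFindWinA wl sl with
    | none => exact le_refl _
    | some p =>
      have ⟨h1, _⟩ := pvFindWinA_some h
      have h2 := ih (wl.take p ++ wl.drop (p + sl.length))
      have hlen : (wl.take p ++ wl.drop (p + sl.length)).length = wl.length - sl.length := by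
        simp [List.length_append]; omega
      show (pvRemoveAllA f (wl.take p ++ wl.drop (p + sl.length)) sl).length ≤ wl.length
      omega

-- the result does not depend on the fuel once it exceeds the list length
theorem pvRemoveAllA_stable {sl : List Int} (hsl : sl ≠ []) :
    ∀ (W f g : Nat) (wl : List Int), wl.length ≤ W → wl.length < f → wl.length < g →
      pvRemoveAllA f wl sl = pvRemoveAllA g wl sl := by
  intro W
  induction W with
  | zero =>
    intro f g wl hW hf hg
    obtain ⟨f', rfl⟩ : ∃ f', f = f' + 1 := ⟨f - 1, by omega⟩
    obtain ⟨g', rfl⟩ : ∃ g', g = g' + 1 := ⟨g - 1, by omega⟩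
    have hwl : wl = [] := by
      cases wl with
      | nil => rfl
      | cons a l => simp at hW
    subst hwl
    have hfind : pvFindWinA [] sl = none := by
      unfold pvFindWinA
      have hsl1 : 1 ≤ sl.length := List.length_pos_iff.mpr hsl
      have : ([] : List Int).length + 1 - sl.length = 0 := by simp; omega
      rw [this]
      rfl
    simp only [pvRemoveAllA, hfind]
  | succ W ih =>
    intro f g wl hW hf hg
    obtain ⟨f', rfl⟩ : ∃ f', f = f' + 1 := ⟨f - 1, by omega⟩
    obtain ⟨g', rfl⟩ : ∃ g', g = g' + 1 := ⟨g - 1, by omega⟩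
    simp only [pvRemoveAllA]
    cases h : pvFindWinA wl sl with
    | none => rfl
    | some p =>
      have ⟨h1, _⟩ := pvFindWinA_some h
      have hsl1 : 1 ≤ sl.length := List.length_pos_iff.mpr hsl
      have hlen : (wl.take p ++ wl.drop (p + sl.length)).length = wl.length - sl.length := by
        simp [List.length_append]; omega
      exact ih f' g' _ (by omega) (by omega) (by omega)

-- first-witness characterisation of find? over a range
theorem pvFind_range_first {n p0 : Nat} {pred : Nat → Bool} (h0 : p0 < n)
    (hp : pred p0 = true) (hlt : ∀ q, q < p0 → pred q = false) :
    (List.range n).find? pred = some p0 := by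
  have hn : n = (p0 + 1) + (n - p0 - 1) := by omega
  rw [hn, List.range_add, List.find?_append, List.range_succ, List.find?_append]
  have h1 : (List.range p0).find? pred = none :=
    List.find?_eq_none.mpr (fun q hq => by
      simp only [List.mem_range] at hq
      simp [hlt q hq])
  rw [h1]
  simp [hp]

-- if the stack is sl-free and the new top matches, that match is the leftmost occurrence
theorem pvFindWinA_first {sl stk : List Int} (x : Int) (rest : List Int)
    (hfree : pvSlFree sl stk) (hsl : sl ≠ []) (hle : sl.length ≤ stk.length + 1)
    (hmatch : (stk ++ [x]).drop (stk.length + 1 - sl.length) = sl) :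
    pvFindWinA (stk ++ x :: rest) sl = some (stk.length + 1 - sl.length) := by
  have hsl1 : 1 ≤ sl.length := List.length_pos_iff.mpr hsl
  have hlen : (stk ++ x :: rest).length = stk.length + 1 + rest.length := by simp; omega
  unfold pvFindWinA
  apply pvFind_range_first
  · omega
  · -- the window at the splice point is the matching stack top
    have hsplit : stk ++ x :: rest = (stk ++ [x]) ++ rest := by simp
    have hdlen : ((stk ++ [x]).drop (stk.length + 1 - sl.length)).length = sl.length := by
      simp; omega
    rw [hsplit, List.drop_append_of_le_length (by simp),
        List.take_append_of_le_length (by omega),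
        List.take_of_length_le (by omega)]
    simpa using hmatch
  · intro q hq
    have hqs : q + sl.length ≤ stk.length := by omega
    have hdrop : (stk ++ x :: rest).drop q = stk.drop q ++ x :: rest :=
      List.drop_append_of_le_length (by omega)
    have htake : ((stk ++ x :: rest).drop q).take sl.length = (stk.drop q).take sl.length := by
      rw [hdrop, List.take_append_of_le_length (by simp; omega)]
    simp only [beq_eq_false_iff_ne, ne_eq, htake]
    exact hfree q hqs

-- prefixes of sl-free lists are sl-free
theorem pvSlFree_take {sl l : List Int} (h : pvSlFree sl l) (n : Nat) :
    pvSlFree sl (l.take n) := by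
  intro p hp
  have hl : (l.take n).length = min n l.length := by simp
  have hdt : ((l.take n).drop p).take sl.length = (l.drop p).take sl.length := by
    rw [List.drop_take, List.take_take]
    congr 1
    omega
  rw [hdt]
  exact h p (by omega)

-- purge's guarded step has the same value as the plain suffix test
theorem pvPurgeStep_eq (sl stk : List Int) (x : Int) :
    pvPurgeStep sl stk x
      = if (stk ++ [x]).drop ((stk ++ [x]).length - sl.length) = sl
        then (stk ++ [x]).take ((stk ++ [x]).length - sl.length) else stk ++ [x] := by
  show (if sl.length ≠ 0 ∧ sl.length ≤ (stk ++ [x]).length ∧ (stk ++ [x]).getLast? = sl.getLast?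
          ∧ (stk ++ [x]).drop ((stk ++ [x]).length - sl.length) = sl
        then (stk ++ [x]).take ((stk ++ [x]).length - sl.length) else stk ++ [x]) = _
  by_cases hsl : sl = []
  · subst hsl
    simp
  · have hk : 1 ≤ sl.length := List.length_pos_iff.mpr hsl
    by_cases hc : (stk ++ [x]).drop ((stk ++ [x]).length - sl.length) = sl
    · have hle : sl.length ≤ (stk ++ [x]).length := by
        by_contra hgt
        have h2 : (((stk ++ [x]).drop ((stk ++ [x]).length - sl.length))).length = sl.length := by
          rw [hc]
        have hlx : (stk ++ [x]).length = stk.length + 1 := by simp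
        rw [List.length_drop, hlx] at h2
        rw [hlx] at hgt
        omega
      have hlast : (stk ++ [x]).getLast? = sl.getLast? := by
        conv_lhs => rw [← List.take_append_drop ((stk ++ [x]).length - sl.length) (stk ++ [x])]
        rw [List.getLast?_append_of_ne_nil _ (by rw [hc]; exact hsl), hc]
      rw [if_pos ⟨by omega, hle, hlast, hc⟩, if_pos hc]
    · rw [if_neg (fun h => hc h.2.2.2), if_neg hc]

-- stack-matcher invariant: folding purge's step over rest from an sl-free stack
-- computes A's repeated leftmost splicing of stk ++ rest
theorem pvPurge_inv {sl : List Int} (hsl : sl ≠ []) :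
    ∀ (rest stk : List Int), pvSlFree sl stk →
      rest.foldl (pvPurgeStep sl) stk = pvRemoveAllA ((stk ++ rest).length + 1) (stk ++ rest) sl := by
  have hsl1 : 1 ≤ sl.length := List.length_pos_iff.mpr hsl
  intro rest
  induction rest with
  | nil =>
    intro stk hfree
    simp only [List.foldl_nil, List.append_nil]
    have hfind := pvFindWinA_none hsl hfree
    simp only [pvRemoveAllA, hfind]
  | cons x rest ih =>
    intro stk hfree
    simp only [List.foldl_cons]
    by_cases hc : (stk ++ [x]).drop ((stk ++ [x]).length - sl.length) = sl
    · -- the new top matches: pop it; A splices the same (leftmost) occurrence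
      have hlx : (stk ++ [x]).length = stk.length + 1 := by simp
      have hle : sl.length ≤ stk.length + 1 := by
        by_contra hgt
        have : (stk ++ [x]).length - sl.length = 0 := by omega
        rw [hlx] at hc
        have h2 : ((stk ++ [x]).drop (stk.length + 1 - sl.length)).length = sl.length := by
          rw [hc]
        simp at h2
        omega
      have hdef := pvPurgeStep_eq sl stk x
      have hstep : pvPurgeStep sl stk x = stk.take (stk.length + 1 - sl.length) := by
        rw [hdef, if_pos hc, hlx]
        exact List.take_append_of_le_length (by omega)
      set p0 := stk.length + 1 - sl.length with hp0
      have hfind : pvFindWinA (stk ++ x :: rest) sl = some p0 := by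
        rw [hlx] at hc
        exact pvFindWinA_first x rest hfree hsl hle hc
      have hsplice : (stk ++ x :: rest).take p0 ++ (stk ++ x :: rest).drop (p0 + sl.length)
          = stk.take p0 ++ rest := by
        have h1 : (stk ++ x :: rest).take p0 = stk.take p0 := by
          rw [List.take_append_of_le_length (by omega)]
        have h2 : (stk ++ x :: rest).drop (p0 + sl.length) = rest := by
          have : p0 + sl.length = (stk ++ [x]).length := by simp; omega
          rw [show stk ++ x :: rest = (stk ++ [x]) ++ rest by simp, this,
              List.drop_left]
        rw [h1, h2]
      have hN : (stk ++ x :: rest).length + 1 = (stk.length + 1 + rest.length) + 1 := by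
        simp; omega
      rw [hstep, ih _ (pvSlFree_take hfree _)]
      have hfuel := pvRemoveAllA_stable hsl (stk.take p0 ++ rest).length
        ((stk.take p0 ++ rest).length + 1) (stk.length + 1 + rest.length) (stk.take p0 ++ rest)
        le_rfl (by omega) (by simp)
      rw [hfuel, hN]
      simp only [pvRemoveAllA, hfind, hsplice]
    · -- no match: push and keep the invariant
      have hdef := pvPurgeStep_eq sl stk x
      have hstep : pvPurgeStep sl stk x = stk ++ [x] := by
        rw [hdef, if_neg hc]
      have hfree' : pvSlFree sl (stk ++ [x]) := by
        intro p hp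
        have hlx : (stk ++ [x]).length = stk.length + 1 := by simp
        have hplen : p + sl.length ≤ stk.length + 1 := by rw [hlx] at hp; exact hp
        by_cases hin : p + sl.length ≤ stk.length
        · have hdrop : (stk ++ [x]).drop p = stk.drop p ++ [x] :=
            List.drop_append_of_le_length (by omega)
          rw [hdrop, List.take_append_of_le_length (by simp; omega)]
          exact hfree p hin
        · have hpe : p = stk.length + 1 - sl.length := by omega
          have hdlen : ((stk ++ [x]).drop p).length = sl.length := by
            simp
            omega
          rw [List.take_of_length_le (by omega)]
          rw [hpe]
          rw [hlx] at hc
          exact hc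
      rw [hstep, ih _ hfree']
      have : stk ++ x :: rest = (stk ++ [x]) ++ rest := by simp
      rw [this]

-- B's purge is A's removal
theorem pvPurgeB_eq (wl sl : List Int) : pvPurgeB wl sl = pvRemoveAllA (wl.length + 1) wl sl := by
  by_cases hsl : sl = []
  · subst hsl
    rw [pvRemoveAllA_nil_sl]
    unfold pvPurgeB
    suffices h : ∀ (l acc : List Int), l.foldl (pvPurgeStep []) acc = acc ++ l by
      simpa using h wl []
    intro l
    induction l with
    | nil => intro acc; simp
    | cons y l ihl =>
      intro acc
      have hstep : pvPurgeStep [] acc y = acc ++ [y] := by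
        rw [pvPurgeStep_eq]
        simp
      simp only [List.foldl_cons, hstep, ihl]
      simp
  · have hfree : pvSlFree sl [] := by
      intro p hp
      have : 1 ≤ sl.length := List.length_pos_iff.mpr hsl
      simp only [List.length_nil] at hp
      omega
    have := pvPurge_inv hsl wl [] hfree
    simpa [pvPurgeB] using this

theorem pvRemoveStateB_eq (lst : List Int) (st : List (List Int)) : pvRemoveStateB lst st = pvRemoveStateA lst st := by
  unfold pvRemoveStateB pvRemoveStateA
  congr 1
  funext wl sl
  exact pvPurgeB_eq wl sl

-- the descending loop is findSome? over the reversed range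
theorem pvDescB_eq {alpha : Type} (f : Int → Option alpha) :
    ∀ (c : Nat) (s : Int),
      pvDescB f c s = ((PySem.List.pyRange (s + 1 - (c : Int)) (s + 1) 1).reverse).findSome? f := by
  intro c
  induction c with
  | zero =>
    intro s
    rw [PySem.List.pyRange_one_eq_nil (by simp)]
    rfl
  | succ c ihc =>
    intro s
    have hsplit : PySem.List.pyRange (s + 1 - ((c : Int) + 1)) (s + 1) 1
        = PySem.List.pyRange (s + 1 - ((c : Int) + 1)) s 1 ++ PySem.List.pyRange s (s + 1) 1 :=
      PySem.List.pyRange_one_append _ _ _ (by omega) (by omega)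
    have hone : PySem.List.pyRange s (s + 1) 1 = [s] := by
      rw [PySem.List.pyRange_one_cons (by omega), PySem.List.pyRange_one_eq_nil (by omega)]
    push_cast
    rw [hsplit, hone, List.reverse_append]
    simp only [List.reverse_singleton, List.singleton_append, List.findSome?_cons]
    have harg : (s - 1) + 1 - (c : Int) = s + 1 - ((c : Int) + 1) := by ring
    show (match f s with | some r => some r | none => pvDescB f c (s - 1)) = _
    cases f s with
    | some r => rfl
    | none =>
      rw [ihc (s - 1), harg, show s - 1 + 1 = s by ring]

-- findSome? respects pointwise equality
theorem pvFindSome_congr {α β : Type} (l : List α) (f g : α → Option β)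
    (h : ∀ x ∈ l, f x = g x) : l.findSome? f = l.findSome? g := by
  induction l with
  | nil => rfl
  | cons x l ih =>
    simp only [List.findSome?_cons, h x (List.mem_cons_self)]
    cases g x with
    | none => exact ih (fun y hy => h y (List.mem_cons_of_mem _ hy))
    | some r => rfl

-- unfolding B's recursion on a nonempty working list into A's child enumeration
theorem pvRecB_unfold (lst : List Int) (mo mi ma : Int) (hmi : 1 ≤ mi) (f : Nat)
    (state : List (List Int)) (hwl : pvRemoveStateA lst state ≠ []) :
    pvRecB lst mo mi ma (f + 1) state
      = ((PySem.List.pyRange mi (min ma ((pvRemoveStateA lst state).length : Int)) 1).reverse).findSome?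
          (fun s => pvRecB lst mo mi ma f (state ++ [PySem.List.slice (pvRemoveStateA lst state) none (some s)])) := by
  have hwlB : pvRemoveStateB lst state ≠ [] := by rw [pvRemoveStateB_eq]; exact hwl
  simp only [pvRecB, pvRemoveStateB_eq, if_neg hwl]
  rw [pvDescB_eq]
  set wl := pvRemoveStateA lst state with hwldef
  set u := min ma ((wl.length : Int)) with hu
  by_cases hum : mi ≤ u
  · have htn : (((u - mi).toNat : Int)) = u - mi := Int.toNat_of_nonneg (by omega)
    have harg : u - 1 + 1 - (((u - mi).toNat : Int)) = mi := by rw [htn]; ring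
    have harg2 : u - 1 + 1 = u := by ring
    rw [harg, harg2]
    refine pvFindSome_congr _ _ _ ?_
    intro s hs
    rw [List.mem_reverse, PySem.List.mem_pyRange_one] at hs
    rw [PySem.List.slice_to _ (by omega)]
  · have htn : (u - mi).toNat = 0 := by omega
    rw [htn]
    have h1 : PySem.List.pyRange (u - 1 + 1 - ((0 : Nat) : Int)) (u - 1 + 1) 1 = [] :=
      PySem.List.pyRange_one_eq_nil (by push_cast; omega)
    have h2 : PySem.List.pyRange mi u 1 = [] :=
      PySem.List.pyRange_one_eq_nil (by omega)
    rw [h1, h2]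
    simp

-- removing a nonempty prefix strictly shrinks
theorem pvRemoveAllA_prefix_le (f : Nat) (wl sl : List Int) (hne : sl ≠ [])
    (hpre : wl.take sl.length = sl) (hlen : sl.length ≤ wl.length) :
    (pvRemoveAllA (f + 1) wl sl).length ≤ wl.length - sl.length := by
  have hfind : pvFindWinA wl sl = some 0 := by
    unfold pvFindWinA
    have h1 : 1 ≤ sl.length := List.length_pos_iff.mpr hne
    have : wl.length + 1 - sl.length = (wl.length - sl.length) + 1 := by omega
    rw [this, List.range_succ_eq_map, List.find?_cons_of_pos]
    simp [hpre]
  simp only [pvRemoveAllA, hfind]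
  have := pvRemoveAllA_le f (wl.take 0 ++ wl.drop (0 + sl.length)) sl
  simp at this ⊢
  omega

-- remove_state of an extended state is a removal from the parent's working list
theorem pvRemoveStateA_append (lst : List Int) (st : List (List Int)) (t : List Int) :
    pvRemoveStateA lst (st ++ [t])
      = pvRemoveAllA ((pvRemoveStateA lst st).length + 1) (pvRemoveStateA lst st) t := by
  unfold pvRemoveStateA
  rw [List.foldl_append]
  rfl

-- the working list of a child state is strictly shorter
theorem pvChild_wl_lt (lst : List Int) (mi ma : Int) (hmi : 1 ≤ mi)
    (st : List (List Int)) (s : Int)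
    (hs : s ∈ PySem.List.pyRange mi (min ma ((pvRemoveStateA lst st).length : Int)) 1) :
    (pvRemoveStateA lst (st ++ [PySem.List.slice (pvRemoveStateA lst st) none (some s)])).length
      < (pvRemoveStateA lst st).length := by
  set wl := pvRemoveStateA lst st with hwl
  rw [PySem.List.mem_pyRange_one] at hs
  obtain ⟨hs1, hs2⟩ := hs
  have hs0 : (0 : Int) ≤ s := by omega
  have hsl : s < (wl.length : Int) := lt_of_lt_of_le hs2 (min_le_right _ _)
  have hk1 : 1 ≤ s.toNat := by omega
  have hk2 : s.toNat < wl.length := by omega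
  rw [PySem.List.slice_to _ hs0]
  set t := wl.take s.toNat with ht
  have htlen : t.length = s.toNat := by
    simp [ht]; omega
  have htne : t ≠ [] := by
    intro h; rw [h] at htlen; simp at htlen; omega
  have hpre : wl.take t.length = t := by rw [htlen]
  rw [pvRemoveStateA_append, ← hwl]
  have := pvRemoveAllA_prefix_le wl.length wl t htne hpre (by omega)
  omega

-- B's recursion with the canonical fuel
def pvRecInf (lst : List Int) (mo mi ma : Int) (st : List (List Int)) : Option (List (List Int)) :=
  pvRecB lst mo mi ma ((pvRemoveStateA lst st).length + 1) st

-- B's recursion is fuel-independent once the fuel exceeds the working-list length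
theorem pvRecB_stable (lst : List Int) (mo mi ma : Int) (hmi : 1 ≤ mi) :
    ∀ (W f : Nat) (st : List (List Int)),
      (pvRemoveStateA lst st).length ≤ W →
      (pvRemoveStateA lst st).length < f →
      pvRecB lst mo mi ma f st = pvRecInf lst mo mi ma st := by
  intro W
  induction W with
  | zero =>
    intro f st hW hf
    obtain ⟨f', rfl⟩ : ∃ f', f = f' + 1 := ⟨f - 1, by omega⟩
    have hwl : pvRemoveStateA lst st = [] := by
      cases h : pvRemoveStateA lst st with
      | nil => rfl
      | cons a l => rw [h] at hW; simp at hW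
    simp only [pvRecB, pvRecInf, pvRemoveStateB_eq, hwl]
    simp
  | succ W ih =>
    intro f st hW hf
    obtain ⟨f', rfl⟩ : ∃ f', f = f' + 1 := ⟨f - 1, by omega⟩
    by_cases hwl : pvRemoveStateA lst st = []
    · simp only [pvRecB, pvRecInf, pvRemoveStateB_eq, hwl]; simp
    · rw [pvRecB_unfold lst mo mi ma hmi f' st hwl]
      have hinf : pvRecInf lst mo mi ma st
          = pvRecB lst mo mi ma ((pvRemoveStateA lst st).length + 1) st := rfl
      rw [hinf, pvRecB_unfold lst mo mi ma hmi (pvRemoveStateA lst st).length st hwl]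
      refine pvFindSome_congr _ _ _ ?_
      intro s hs
      rw [List.mem_reverse] at hs
      have hchild := pvChild_wl_lt lst mi ma hmi st s hs
      have h1 := ih f' (st ++ [PySem.List.slice (pvRemoveStateA lst st) none (some s)]) (by omega) (by omega)
      have h2 := ih (pvRemoveStateA lst st).length (st ++ [PySem.List.slice (pvRemoveStateA lst st) none (some s)]) (by omega) (by omega)
      rw [h1, h2]

-- main invariant: with enough fuel, A's stack loop is the first success of B's recursion
-- over the stack (head = top of the deque)
theorem pvLoopA_eq (lst : List Int) (mo mi ma : Int) (hmi : 1 ≤ mi) :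
    ∀ (f : Nat) (stack : List (List (List Int))),
      (∀ st ∈ stack, (pvRemoveStateA lst st).length ≤ lst.length) →
      ((stack.map (fun st => (lst.length + 2) ^ ((pvRemoveStateA lst st).length + 1))).sum ≤ f) →
      pvLoopA lst mo mi ma f stack = stack.findSome? (pvRecInf lst mo mi ma) := by
  intro f
  induction f with
  | zero =>
    intro stack hb hsum
    cases stack with
    | nil => rfl
    | cons st rest =>
      exfalso
      simp only [List.map_cons, List.sum_cons, Nat.le_zero] at hsum
      have : 1 ≤ (lst.length + 2) ^ ((pvRemoveStateA lst st).length + 1) :=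
        Nat.one_le_pow _ _ (by omega)
      omega
  | succ f ih =>
    intro stack hb hsum
    cases stack with
    | nil => rfl
    | cons st rest =>
      simp only [pvLoopA, List.findSome?_cons]
      set wl := pvRemoveStateA lst st with hwl
      by_cases hret : wl = [] ∧ ((st.length : Int) ≤ mo)
      · rw [if_pos hret]
        have : pvRecInf lst mo mi ma st = some st := by
          simp only [pvRecInf, pvRecB, pvRemoveStateB_eq, ← hwl, hret.1]
          simp [hret.2]
        rw [this]
      · rw [if_neg hret]
        by_cases hnil : wl = []
        · -- empty working list but too many sublists: no children, drop the state
          have hcount : ¬ ((st.length : Int) ≤ mo) := fun h => hret ⟨hnil, h⟩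
          have hrange : PySem.List.pyRange mi (min ma ((wl.length : Int))) 1 = [] := by
            apply PySem.List.pyRange_one_eq_nil
            have := min_le_right ma ((wl.length : Int))
            simp [hnil] at this ⊢
            omega
          rw [hrange]
          simp only [List.map_nil, List.reverse_nil, List.nil_append]
          have hrec : pvRecInf lst mo mi ma st = none := by
            simp only [pvRecInf, pvRecB, pvRemoveStateB_eq, ← hwl, hnil]
            simp [hcount]
          rw [hrec]
          apply ih
          · intro x hx; exact hb x (List.mem_cons_of_mem _ hx)
          · simp only [List.map_cons, List.sum_cons] at hsum
            rw [← hwl] at hsum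
            have : 1 ≤ (lst.length + 2) ^ (wl.length + 1) := Nat.one_le_pow _ _ (by omega)
            omega
        · -- nonempty working list: push the children, recurse
          have hm1 : 1 ≤ wl.length := List.length_pos_iff.mpr hnil
          have hmn : wl.length ≤ lst.length := hb st (List.mem_cons_self)
          set mk := fun s => st ++ [PySem.List.slice wl none (some s)] with hmk
          set ss := PySem.List.pyRange mi (min ma ((wl.length : Int))) 1 with hss
          have hchild : ∀ s ∈ ss, (pvRemoveStateA lst (mk s)).length < wl.length := by
            intro s hs
            exact pvChild_wl_lt lst mi ma hmi st s (by rw [← hwl]; exact hs)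
          -- child count is at most wl.length - 1
          have hc : ss.length ≤ wl.length - 1 := by
            rw [hss, PySem.List.length_pyRange_one]
            have := min_le_right ma ((wl.length : Int))
            omega
          -- fuel accounting
          have hsum' : (((ss.map mk).reverse ++ rest).map
              (fun st => (lst.length + 2) ^ ((pvRemoveStateA lst st).length + 1))).sum ≤ f := by
            rw [List.map_append, List.sum_append]
            simp only [List.map_cons, List.sum_cons] at hsum
            rw [← hwl] at hsum
            have hone : 1 ≤ (lst.length + 2) ^ wl.length := Nat.one_le_pow _ _ (by omega)
            have hbound : (((ss.map mk).reverse).map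
                (fun st => (lst.length + 2) ^ ((pvRemoveStateA lst st).length + 1))).sum
                ≤ ss.length * (lst.length + 2) ^ wl.length := by
              rw [List.map_reverse, List.sum_reverse, List.map_map]
              calc ((ss.map fun s => (lst.length + 2) ^ ((pvRemoveStateA lst (mk s)).length + 1))).sum
                  ≤ (ss.map fun _ => (lst.length + 2) ^ wl.length).sum := by
                    apply List.sum_le_sum
                    intro s hs
                    apply Nat.pow_le_pow_right (by omega)
                    have := hchild s hs
                    omega
                _ = ss.length * (lst.length + 2) ^ wl.length := by
                    simp [List.map_const', Nat.mul_comm]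
            have hstep : ss.length * (lst.length + 2) ^ wl.length + 1 + (lst.length + 2) ^ wl.length
                ≤ (lst.length + 2) ^ (wl.length + 1) := by
              rw [pow_succ]
              have hc' : ss.length + 2 ≤ lst.length + 2 := by omega
              calc ss.length * (lst.length + 2) ^ wl.length + 1 + (lst.length + 2) ^ wl.length
                  ≤ ss.length * (lst.length + 2) ^ wl.length + (lst.length + 2) ^ wl.length
                      + (lst.length + 2) ^ wl.length := by omega
                _ = (ss.length + 2) * (lst.length + 2) ^ wl.length := by ring
                _ ≤ (lst.length + 2) * (lst.length + 2) ^ wl.length :=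
                    Nat.mul_le_mul_right _ hc'
                _ = (lst.length + 2) ^ wl.length * (lst.length + 2) := Nat.mul_comm _ _
            omega
          have hbs : ∀ x ∈ (ss.map mk).reverse ++ rest, (pvRemoveStateA lst x).length ≤ lst.length := by
            intro x hx
            rcases List.mem_append.mp hx with hx | hx
            · rw [List.mem_reverse] at hx
              obtain ⟨s, hs, rfl⟩ := List.mem_map.mp hx
              have := hchild s hs
              omega
            · exact hb x (List.mem_cons_of_mem _ hx)
          rw [ih _ hbs hsum']
          -- now compute recInf at st
          have hrec : pvRecInf lst mo mi ma st
              = ((ss.map mk).reverse).findSome? (pvRecInf lst mo mi ma) := by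
            have : pvRecInf lst mo mi ma st = pvRecB lst mo mi ma (wl.length + 1) st := rfl
            rw [this, pvRecB_unfold lst mo mi ma hmi wl.length st (by rw [← hwl]; exact hnil), ← hwl, ← hss]
            rw [← List.map_reverse, List.findSome?_map]
            refine pvFindSome_congr _ _ _ ?_
            intro s hs
            rw [List.mem_reverse] at hs
            have hch := hchild s hs
            simp only [hmk] at hch
            exact pvRecB_stable lst mo mi ma hmi wl.length _ _ (by omega) (by omega)
          rw [List.findSome?_append, hrec]
          cases ((ss.map mk).reverse).findSome? (pvRecInf lst mo mi ma) with
          | none => rfl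
          | some r => rfl

-- ===== VERDICT (by name: the statement is the Claim_ definition above) =====
theorem find_sublists_spec : Claim_equal_find_sublists := by
  intro lst max_occur min_size max_size _hdom hpre
  unfold Spec_find_sublists find_sublists find_sublists_alt
  have hmi : 1 ≤ min_size := hpre
  have hroot : pvRemoveStateA lst [] = lst := rfl
  rw [pvLoopA_eq lst (max_occur.getD (lst.length : Int)) min_size (max_size.getD (lst.length : Int)) hmi
      _ [[]] (by intro st hst; simp at hst; subst hst; rw [hroot])
      (by simp only [List.map_cons, List.map_nil, List.sum_cons, List.sum_nil, hroot]
          have := Nat.pow_le_pow_right (n := lst.length + 2) (by omega) (show lst.length + 1 ≤ lst.length + 2 by omega)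
          omega)]
  simp only [List.findSome?_cons]
  have : pvRecInf lst (max_occur.getD (lst.length : Int)) min_size (max_size.getD (lst.length : Int)) []
      = pvRecB lst (max_occur.getD (lst.length : Int)) min_size (max_size.getD (lst.length : Int)) (lst.length + 1) [] := by
    simp only [pvRecInf, hroot]
  rw [← this]
  cases h : pvRecInf lst (max_occur.getD (lst.length : Int)) min_size (max_size.getD (lst.length : Int)) [] with
  | none => simp
  | some r => rfl
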